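-- pv_equiv track=rewrite | github.com/Sedinha/APC--Computer-Algorithms-and-Programming-in-Python-- | Strings/E_4.py | imparX
-- ===== SOURCE A (Python) =====
-- def imparX(s):
--     i=0
--     nova_frase = ""
--     for impar in s:
--         if impar == s[(i*2)+1:(i*2)+2]:
--             nova_frase += impar
--             i += 1
--     news = nova_frase.replace(" ","")
--     return news
-- ===== SOURCE B (Python) =====
-- def imparX(s):
--     return s[1::2].replace(" ", "")
-- ===== Notes on version B (the rewrite author's own statement) =====
-- stated objective: simpler
-- what changed: A's sliding-slice matching scan (compare every character against the current odd-index slice, advancing a counter on match) is replaced by the closed-form stride slice s[1::2] with spaces removed.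
import Mathlib
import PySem

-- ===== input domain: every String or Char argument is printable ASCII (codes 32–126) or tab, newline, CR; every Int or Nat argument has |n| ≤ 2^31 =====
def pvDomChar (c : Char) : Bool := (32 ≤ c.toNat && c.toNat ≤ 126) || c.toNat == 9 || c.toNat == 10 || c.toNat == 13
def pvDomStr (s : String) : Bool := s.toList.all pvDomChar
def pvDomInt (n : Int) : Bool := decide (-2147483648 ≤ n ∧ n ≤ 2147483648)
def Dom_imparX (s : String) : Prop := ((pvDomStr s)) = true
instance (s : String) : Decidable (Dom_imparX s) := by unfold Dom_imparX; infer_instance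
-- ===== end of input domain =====

-- B replaces A's sliding-slice matching scan with the closed-form stride slice s[1::2]
-- followed by space removal (simpler; same return value on every string input).

-- ===== PORT A =====
-- i = 0; nova_frase = ""; for impar in s: if impar == s[(i*2)+1:(i*2)+2]: nova_frase += impar; i += 1
-- return nova_frase.replace(" ", "")
def imparX (s : String) : String :=
  let r := s.toList.foldl
    (fun (st : Int × List Char) impar =>
      if [impar] = PySem.List.slice s.toList (some (st.1 * 2 + 1)) (some (st.1 * 2 + 2)) then
        (st.1 + 1, st.2 ++ [impar])
      else st)
    (0, [])
  String.ofList (PySem.Chars.replace r.2 [' '] [])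

-- ===== PORT B =====
-- return s[1::2].replace(" ", "")
def imparX_alt (s : String) : String :=
  match PySem.Str.slice? s (some 1) none 2 with
  | some t => PySem.Str.replace t " " ""
  | none => ""   -- unreachable: step 2 ≠ 0

-- ===== PRECONDITION & SPEC =====
def Spec_imparX (s : String) (out : String) : Prop := out = imparX_alt s
instance (s : String) (out : String) : Decidable (Spec_imparX s out) := by unfold Spec_imparX; infer_instance

-- ===== CLAIM (what is proved, stated in full; the proofs are below) =====
def Claim_equal_imparX : Prop := ∀ (s : String), Dom_imparX s → Spec_imparX s (imparX s)

-- ===== LEMMAS AND PROOFS =====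

/-- The odd-indexed elements of a list: positions 1, 3, 5, … -/
def pvOdds {α : Type} : List α → List α
  | [] => []
  | [_] => []
  | _ :: b :: t => b :: pvOdds t

theorem pvOdds_of_length_le_one {α : Type} (l : List α) (h : l.length ≤ 1) :
    pvOdds l = [] := by
  match l, h with
  | [], _ => rfl
  | [_], _ => rfl

theorem pvOdds_drop_two {α : Type} (l : List α) (i : Nat) (h : 2 * i + 1 < l.length) :
    pvOdds (l.drop (2 * i)) = l[2 * i + 1] :: pvOdds (l.drop (2 * i + 2)) := by
  rw [List.drop_eq_getElem_cons (by omega : 2 * i < l.length),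
      List.drop_eq_getElem_cons (by omega : 2 * i + 1 < l.length)]
  rw [pvOdds]

/-- The index list `range (n/2)` read at positions `1 + 2k` is `pvOdds`. -/
theorem pvFilterMap (l : List Char) :
    List.filterMap (fun (x : Nat) => l[((1:Int) + 2*(x:Int)).toNat]?) (List.range (l.length/2))
      = pvOdds l := by
  induction l using pvOdds.induct with
  | case1 => simp [pvOdds]
  | case2 _ => simp [pvOdds]
  | case3 a b t ih =>
    have hlen : (a::b::t).length/2 = t.length/2 + 1 := by simp; omega
    rw [hlen, List.range_succ_eq_map, List.filterMap_cons, List.filterMap_map]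
    have hfun : ∀ k ∈ List.range (t.length/2),
        ((fun (x : Nat) => (a::b::t)[((1:Int) + 2*(x:Int)).toNat]?) ∘ Nat.succ) k
          = t[((1:Int) + 2*(k:Int)).toNat]? := by
      intro k _
      have h1 : ((1:Int) + 2*((k.succ:Nat):Int)).toNat = 2*k+1+1+1 := by push_cast; omega
      have h2 : ((1:Int) + 2*((k:Nat):Int)).toNat = 2*k+1 := by omega
      simp only [Function.comp, h1, h2, List.getElem?_cons_succ]
    rw [List.filterMap_congr hfun, ih]
    simp [pvOdds]

/-- B side: the stride-2 slice from index 1 is exactly `pvOdds`. -/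
theorem pvSliceB (l : List Char) :
    PySem.List.slice? l (some 1) none 2 = some (pvOdds l) := by
  simp only [PySem.List.slice?, PySem.List.sliceIndices]
  norm_num
  by_cases h : 1 < l.length
  · have hmin : min (1:Int) (l.length:Int) = 1 := by omega
    simp only [hmin, if_pos h]
    have hC : (((l.length:Int) - 1 + 2 - 1)/2).toNat = l.length/2 := by omega
    rw [hC]
    exact pvFilterMap l
  · simp only [if_neg h, List.range_zero, List.filterMap_nil,
      pvOdds_of_length_le_one l (by omega)]

/-- A side: the scanning fold collects exactly the odd-indexed characters.
    Invariant: at scan position `p` with match count `i`, `p ≤ 2i+1` (the target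
    slice index is never behind the scan). -/
theorem pvFoldA (l : List Char) (r : List Char) (p i : Nat) (acc : List Char)
    (hr : l.drop p = r) (hp : p ≤ 2 * i + 1) :
    (r.foldl
      (fun (st : Int × List Char) impar =>
        if [impar] = PySem.List.slice l (some (st.1 * 2 + 1)) (some (st.1 * 2 + 2)) then
          (st.1 + 1, st.2 ++ [impar])
        else st)
      ((i : Int), acc)).2 = acc ++ pvOdds (l.drop (2 * i)) := by
  induction r generalizing p i acc with
  | nil =>
    have hlen : l.length ≤ p := List.drop_eq_nil_iff.mp hr
    simp [pvOdds_of_length_le_one (l.drop (2 * i)) (by simp; omega)]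
  | cons c r' ih =>
    have hpl : p < l.length := by
      by_contra hc
      rw [List.drop_eq_nil_of_le (by omega)] at hr
      simp at hr
    rw [List.drop_eq_getElem_cons hpl] at hr
    obtain ⟨hc, hr'⟩ : l[p] = c ∧ l.drop (p + 1) = r' := by
      exact ⟨(List.cons.inj hr).1, (List.cons.inj hr).2⟩
    have hslice : PySem.List.slice l (some ((i:Int) * 2 + 1)) (some ((i:Int) * 2 + 2))
        = (l.drop (2 * i + 1)).take 1 := by
      have h1 : ((i:Int) * 2 + 1) = ((2 * i + 1 : Nat) : Int) := by push_cast; ring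
      have h2 : ((i:Int) * 2 + 2) = ((2 * i + 2 : Nat) : Int) := by push_cast; ring
      rw [h1, h2, PySem.List.slice_natCast]
      congr 1
      omega
    rw [List.foldl_cons]
    split_ifs with hcond
    · rw [hslice] at hcond
      have hlt : 2 * i + 1 < l.length := by
        by_contra hn
        rw [List.drop_eq_nil_of_le (by omega)] at hcond
        simp at hcond
      have hceq : l[2 * i + 1] = c := by
        rw [List.drop_eq_getElem_cons hlt, List.take_succ_cons, List.take_zero] at hcond
        exact ((List.cons.inj hcond).1).symm
      have hcast : ((i : Int) + 1) = ((i + 1 : Nat) : Int) := by push_cast; ring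
      rw [hcast]
      rw [ih (p + 1) (i + 1) (acc ++ [c]) hr' (by omega)]
      rw [pvOdds_drop_two l i hlt]
      have h2 : 2 * (i + 1) = 2 * i + 2 := by ring
      rw [h2, hceq]
      simp
    · have hp' : p + 1 ≤ 2 * i + 1 := by
        rcases Nat.lt_or_ge p (2 * i + 1) with h | h
        · omega
        · exfalso
          have hpe : p = 2 * i + 1 := by omega
          apply hcond
          rw [hslice, ← hpe, List.drop_eq_getElem_cons hpl]
          simp [hc]
      exact ih (p + 1) i acc hr' hp'

-- ===== VERDICT (by name: the statement is the Claim_ definition above) =====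
theorem imparX_spec : Claim_equal_imparX := by
  intro s _
  unfold Spec_imparX
  have hb : PySem.Str.slice? s (some 1) none 2 = some (String.ofList (pvOdds s.toList)) := by
    have h1 := PySem.Str.slice?_map s (some 1) none 2
    rw [PySem.Chars.slice?_eq_listSlice?, pvSliceB] at h1
    cases hx : PySem.Str.slice? s (some 1) none 2 with
    | none => rw [hx] at h1; simp at h1
    | some t =>
      rw [hx] at h1
      simp only [Option.map_some, Option.some.injEq] at h1
      rw [← h1]
      simp
  have halt : imparX_alt s = PySem.Str.replace (String.ofList (pvOdds s.toList)) " " "" := by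
    unfold imparX_alt
    rw [hb]
  rw [halt]
  have ha := pvFoldA s.toList s.toList 0 0 [] rfl (by omega)
  simp only [Nat.cast_zero, Nat.mul_zero, List.drop_zero, List.nil_append] at ha
  show String.ofList (PySem.Chars.replace
      (List.foldl
        (fun (st : Int × List Char) impar =>
          if [impar] = PySem.List.slice s.toList (some (st.1 * 2 + 1)) (some (st.1 * 2 + 2)) then
            (st.1 + 1, st.2 ++ [impar])
          else st)
        (0, []) s.toList).2 [' '] []) = _
  rw [ha, PySem.Str.replace, String.toList_ofList]
  rfl
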